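-- pv_equiv track=rewrite | github.com/johnlspouge/2024-05-11_threshold_day | Executable/modules/jls_epidemic_simulation_active_out.py | to_counts
-- ===== SOURCE A (Python) =====
-- from collections import Counter
--
-- def to_counts(times): # timess[0:#(active_watchers))[0:REALIZATION) ; times = timess[i] for some i in [0:REALIZATION)
--     assert all([isinstance(time, int) for time in times])
--     counter = dict(Counter(times))
--     max_time = max(counter.keys())
--     counts = []
--     for t in range(max_time+1):
--         counts.append(counter.get(t,0)) # Outputs {days, counts}.
--     assert sum(counts) == len(times)
--     return counts
-- ===== SOURCE B (Python) =====
-- def to_counts(times):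
--     ts = sorted(times)
--     counts = []
--     prev = -1
--     i = 0
--     n = len(ts)
--     while i < n:
--         t = ts[i]
--         j = i
--         while j < n and ts[j] == t:
--             j += 1
--         counts.extend([0] * (t - prev - 1))
--         counts.append(j - i)
--         prev = t
--         i = j
--     return counts
-- ===== Notes on version B (the rewrite author's own statement) =====
-- stated objective: alternative
-- what changed: Replaces A's Counter-dict plus gather loop over range(max+1) with sort-then-scan: sort the times once, then a single linear sweep over the sorted list emits a zero-block for each gap and one run-length per distinct value.
-- outside the precondition, e.g. on to_counts([]): A raises ValueError, B returns []; on to_counts([-2, 1]): A raises AssertionError, B returns [1, 0, 0, 1]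
import Mathlib
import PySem

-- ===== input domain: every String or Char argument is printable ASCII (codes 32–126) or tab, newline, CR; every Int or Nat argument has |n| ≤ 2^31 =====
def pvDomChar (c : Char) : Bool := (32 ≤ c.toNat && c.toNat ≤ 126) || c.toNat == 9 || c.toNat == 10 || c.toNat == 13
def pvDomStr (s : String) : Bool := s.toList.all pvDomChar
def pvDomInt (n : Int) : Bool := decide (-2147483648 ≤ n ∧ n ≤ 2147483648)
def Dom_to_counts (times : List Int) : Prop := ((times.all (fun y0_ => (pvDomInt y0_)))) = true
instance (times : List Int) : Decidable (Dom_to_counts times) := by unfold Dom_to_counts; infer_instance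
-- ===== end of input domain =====

-- B replaces A's Counter + gather over range(max+1) by sort-then-scan: one sweep over the sorted
-- list emitting a zero block per gap and a run length per distinct value (alternative algorithm).

-- ===== PORT A =====
def to_counts (times : List Int) : List Int :=
  -- counter = dict(Counter(times)); max_time = max(counter.keys())  (max raises on empty: excluded by Pre_)
  let counter := PySem.Dict.counter times
  let max_time := (PySem.List.max? counter.keys (fun x => x)).getD 0
  -- for t in range(max_time+1): counts.append(counter.get(t,0))
  (PySem.List.pyRange 0 (max_time + 1) 1).foldl (fun acc t => acc ++ [counter.getD t 0]) []

-- ===== PORT B =====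
-- the outer while loop of Source B: consume one run of equal values (the inner while = takeWhile),
-- emitting the gap's zeros ([0]*(t-prev-1)) and the run length, then continue past the run
def buildRuns : List Int → Int → List Int
  | [], _ => []
  | t :: rest, prev =>
    let run : Nat := 1 + (rest.takeWhile (fun x => x == t)).length
    List.replicate (t - prev - 1).toNat 0 ++ [(run : Int)]
      ++ buildRuns (rest.dropWhile (fun x => x == t)) t
termination_by ts _ => ts.length
decreasing_by
  simp only [List.length_cons]
  exact Nat.lt_succ_of_le (List.length_dropWhile_le _ _)

def to_counts_alt (times : List Int) : List Int :=
  -- ts = sorted(times); then the sweep starting at prev = -1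
  buildRuns (PySem.List.sorted times (fun x => x) false) (-1)

-- ===== PRECONDITION & SPEC =====
-- Pre_ excludes exactly the inputs on which A raises: the empty list (max() raises ValueError)
-- and lists containing a negative time (A's final sum-assert fails: AssertionError).
def Pre_to_counts (times : List Int) : Prop := times ≠ [] ∧ ∀ t ∈ times, 0 ≤ t
instance (times : List Int) : Decidable (Pre_to_counts times) := by unfold Pre_to_counts; infer_instance
def pvWitness_to_counts : List Int := [2, 0, 2]

def Spec_to_counts (times : List Int) (out : List Int) : Prop := out = to_counts_alt times
instance (times : List Int) (out : List Int) : Decidable (Spec_to_counts times out) := by unfold Spec_to_counts; infer_instance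

-- ===== CLAIM (what is proved, stated in full; the proofs are below) =====
def Claim_equal_to_counts : Prop := ∀ (times : List Int), Dom_to_counts times → Pre_to_counts times → Spec_to_counts times (to_counts times)

-- ===== LEMMAS AND PROOFS =====

-- On nonempty lists with the same members, max? (with identity key) yields the same value.
theorem max_val_eq_of_same_mem (xs ys : List Int) (hne : xs ≠ [])
    (hmem : ∀ x, x ∈ xs ↔ x ∈ ys) :
    PySem.List.max? xs (fun x => x) = PySem.List.max? ys (fun x => x) := by
  have hyne : ys ≠ [] := by
    intro h; subst h
    cases xs with
    | nil => exact hne rfl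
    | cons a t => exact absurd ((hmem a).mp (by simp)) (by simp)
  obtain ⟨a, ha⟩ : ∃ a, PySem.List.max? xs (fun x => x) = some a := by
    cases h : PySem.List.max? xs (fun x => x) with
    | none => exact absurd ((PySem.List.max?_eq_none_iff _ _).mp h) hne
    | some a => exact ⟨a, rfl⟩
  obtain ⟨b, hb⟩ : ∃ b, PySem.List.max? ys (fun x => x) = some b := by
    cases h : PySem.List.max? ys (fun x => x) with
    | none => exact absurd ((PySem.List.max?_eq_none_iff _ _).mp h) hyne
    | some b => exact ⟨b, rfl⟩
  have hab : a ≤ b := PySem.List.max?_isMax hb a ((hmem a).mp (PySem.List.max?_mem ha))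
  have hba : b ≤ a := PySem.List.max?_isMax ha b ((hmem b).mpr (PySem.List.max?_mem hb))
  rw [ha, hb, le_antisymm hab hba]

-- a nonempty list has a max? value
theorem max?_exists (xs : List Int) (hne : xs ≠ []) :
    ∃ a, PySem.List.max? xs (fun x => x) = some a := by
  cases h : PySem.List.max? xs (fun x => x) with
  | none => exact absurd ((PySem.List.max?_eq_none_iff _ _).mp h) hne
  | some a => exact ⟨a, rfl⟩

-- A's result is the table of counts over range(0, max+1)
theorem to_counts_eq_map (times : List Int) (h : Pre_to_counts times) :
    to_counts times
      = (PySem.List.pyRange 0 ((PySem.List.max? times (fun x => x)).getD 0 + 1) 1).map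
          (fun t => (times.count t : Int)) := by
  obtain ⟨hne, _⟩ := h
  unfold to_counts
  show (PySem.List.pyRange 0
        ((PySem.List.max? (PySem.Dict.counter times).keys (fun x => x)).getD 0 + 1) 1).foldl
      (fun acc t => acc ++ [(PySem.Dict.counter times).getD t 0]) [] = _
  have hkeys : ∀ x, x ∈ (PySem.Dict.counter times).keys ↔ x ∈ times := by
    intro x; rw [PySem.Dict.keys_counter, PySem.Set.mem_ofList]
  have hknil : (PySem.Dict.counter times).keys ≠ [] := by
    intro hk
    cases times with
    | nil => exact hne rfl
    | cons a t => exact absurd ((hkeys a).mpr (by simp)) (by simp [hk])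
  rw [max_val_eq_of_same_mem _ times hknil hkeys]
  rw [PySem.List.foldl_append_singleton_eq_map]
  simp only [List.nil_append]
  exact List.map_congr_left (fun t _ => PySem.Dict.getD_counter ..)

-- a map of all-zero counts over a range is a replicate of zeros
theorem map_count_zero (l ts : List Int) (habs : ∀ j ∈ l, ts.count j = 0) :
    l.map (fun j => (ts.count j : Int)) = List.replicate l.length 0 := by
  induction l with
  | nil => rfl
  | cons a l ih =>
    simp only [List.map_cons, List.length_cons, List.replicate_succ]
    rw [habs a (by simp), ih (fun j hj => habs j (by simp [hj]))]
    simp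

-- sorted nonempty: the last element is the max
theorem getLast_isMax (ts : List Int) (hs : ts.Pairwise (· ≤ ·)) (d : Int) (hne : ts ≠ []) :
    ∀ x ∈ ts, x ≤ ts.getLastD d := by
  intro x hx
  rw [List.getLastD_eq_getLast?, List.getLast?_eq_some_getLast hne, Option.getD_some]
  rcases (List.mem_iff_getElem).mp hx with ⟨i, hi, rfl⟩
  rw [List.getLast_eq_getElem]
  rcases Nat.lt_or_ge i (ts.length - 1) with h | h
  · exact List.pairwise_iff_getElem.mp hs i (ts.length - 1) hi (by omega) h
  · have : i = ts.length - 1 := by omega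
    simp [this]

-- the head of dropWhile p fails p
theorem dropWhile_head_not (p : Int → Bool) (l : List Int) (a : Int) (r : List Int)
    (h : l.dropWhile p = a :: r) : p a = false := by
  induction l with
  | nil => simp at h
  | cons x xs ih =>
    rw [List.dropWhile_cons] at h
    by_cases hx : p x = true
    · rw [if_pos hx] at h; exact ih h
    · rw [if_neg hx] at h
      cases h; simpa using hx

-- the core invariant of Source B's sweep: on a sorted list whose elements all exceed prev,
-- buildRuns produces exactly the count table over (prev, last]
theorem buildRuns_eq (n : Nat) (ts : List Int) (prev : Int) (hn : ts.length ≤ n)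
    (hs : ts.Pairwise (· ≤ ·)) (hgt : ∀ x ∈ ts, prev < x) :
    buildRuns ts prev
      = (PySem.List.pyRange (prev + 1) (ts.getLastD prev + 1) 1).map
          (fun j => (ts.count j : Int)) := by
  induction n generalizing ts prev with
  | zero =>
    have : ts = [] := List.eq_nil_of_length_eq_zero (by omega)
    subst this
    simp [buildRuns]
  | succ n ih =>
    cases ts with
    | nil => simp [buildRuns]
    | cons t rest =>
      have hpt : prev < t := hgt t (by simp)
      have hrest_ge : ∀ x ∈ rest, t ≤ x := (List.pairwise_cons.mp hs).1
      have htw : rest.takeWhile (fun x => x == t)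
          = List.replicate (rest.takeWhile (fun x => x == t)).length t := by
        apply List.eq_replicate_of_mem
        intro x hx
        have := List.mem_takeWhile_imp hx
        simpa using this.symm
      have hdecomp : t :: rest
          = List.replicate (1 + (rest.takeWhile (fun x => x == t)).length) t
            ++ rest.dropWhile (fun x => x == t) := by
        conv_lhs => rw [← List.takeWhile_append_dropWhile (p := fun x => x == t) (l := rest)]
        rw [Nat.add_comm, List.replicate_succ]
        rw [← htw, List.cons_append]
      set tail := rest.dropWhile (fun x => x == t) with htail
      have hs_tail : tail.Pairwise (· ≤ ·) :=
        hs.sublist ((List.dropWhile_sublist _).trans (List.sublist_cons_self _ _))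
      have htail_gt : ∀ x ∈ tail, t < x := by
        cases htl : tail with
        | nil => simp
        | cons h r2 =>
          have hh_mem : h ∈ rest := (List.dropWhile_sublist _).mem (by rw [← htail, htl]; simp)
          have hh_ne : h ≠ t := by
            have hf := dropWhile_head_not (fun x => x == t) rest h r2 (htail ▸ htl)
            simpa using hf
          have hh_gt : t < h := lt_of_le_of_ne (hrest_ge h hh_mem) (Ne.symm hh_ne)
          intro x hx
          rcases List.mem_cons.mp hx with rfl | hx2
          · exact hh_gt
          · have := (List.pairwise_cons.mp (htl ▸ hs_tail)).1 x hx2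
            omega
      have hcount : ∀ j : Int, (t :: rest).count j
          = (if j = t then 1 + (rest.takeWhile (fun x => x == t)).length else 0)
            + tail.count j := by
        intro j
        conv_lhs => rw [hdecomp]
        rw [List.count_append, List.count_replicate]
        rcases eq_or_ne j t with hj | hj
        · simp [hj]
        · have hj' : t ≠ j := fun h => hj h.symm
          simp [hj, hj']
      have htail_count_le : ∀ j : Int, j ≤ t → tail.count j = 0 := by
        intro j hj
        rw [List.count_eq_zero]
        intro hmem
        exact absurd (htail_gt j hmem) (by omega)
      have hlen_tail : tail.length ≤ n := by
        have h1 : tail.length ≤ rest.length := List.length_dropWhile_le (fun x => x == t) rest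
        simp only [List.length_cons] at hn
        omega
      have ihres := ih tail t hlen_tail hs_tail htail_gt
      -- unfold one step of buildRuns
      rw [buildRuns]
      rw [ihres]
      have hzero : (PySem.List.pyRange (prev + 1) t).map (fun j => ((t :: rest).count j : Int))
          = List.replicate (t - prev - 1).toNat 0 := by
        rw [map_count_zero]
        · rw [PySem.List.length_pyRange_one]
          congr 1; omega
        · intro j hj
          rw [PySem.List.mem_pyRange_one] at hj
          rw [hcount, htail_count_le j (by omega)]
          simp; omega
      have hcr : rest.count t = (rest.takeWhile (fun x => x == t)).length := by
        have h0 := hcount t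
        rw [htail_count_le t le_rfl] at h0
        simp at h0
        omega
      by_cases htl : tail = []
      · -- no further runs: last element of t::rest is t
        have hlast : (t :: rest).getLastD prev = t := by
          rw [hdecomp, htl, List.append_nil]
          rw [List.getLastD_eq_getLast?, List.getLast?_replicate]
          simp
        have hz : PySem.List.pyRange (t + 1) (t + 1) = [] := by
          simp
        rw [htl]
        simp only [List.getLastD_nil]
        rw [hz, List.map_nil, List.append_nil, hlast]
        rw [PySem.List.pyRange_one_succ_right (a := prev + 1) (b := t) (by omega),
          List.map_append, hzero]
        simp
        push_cast [hcr]
        ring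
      · -- further runs: last element comes from the tail
        have hLmem : tail.getLastD t ∈ tail := by
          rw [List.getLastD_eq_getLast?, List.getLast?_eq_some_getLast htl, Option.getD_some]
          exact List.getLast_mem htl
        have hLt : t < tail.getLastD t := htail_gt _ hLmem
        have hlast : (t :: rest).getLastD prev = tail.getLastD t := by
          conv_lhs => rw [hdecomp]
          rw [List.getLastD_eq_getLast?, List.getLast?_append, List.getLast?_eq_some_getLast htl,
            List.getLastD_eq_getLast?, List.getLast?_eq_some_getLast htl]
          rfl
        rw [hlast]
        rw [PySem.List.pyRange_one_append (prev + 1) (t + 1) (tail.getLastD t + 1)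
          (by omega) (by omega)]
        rw [List.map_append]
        rw [PySem.List.pyRange_one_succ_right (a := prev + 1) (b := t) (by omega),
          List.map_append, hzero]
        have htailmap : (PySem.List.pyRange (t + 1) (tail.getLastD t + 1)).map
              (fun j => ((t :: rest).count j : Int))
            = (PySem.List.pyRange (t + 1) (tail.getLastD t + 1)).map
              (fun j => (tail.count j : Int)) := by
          apply List.map_congr_left
          intro j hj
          rw [PySem.List.mem_pyRange_one] at hj
          rw [hcount]
          simp; omega
        rw [htailmap]
        simp
        push_cast [hcr]
        ring

-- ===== VERDICT (by name: the statement is the Claim_ definition above) =====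
theorem to_counts_spec : Claim_equal_to_counts := by
  intro times _ hpre
  obtain ⟨hne, hpos⟩ := hpre
  unfold Spec_to_counts
  rw [to_counts_eq_map times ⟨hne, hpos⟩]
  unfold to_counts_alt
  set st := PySem.List.sorted times (fun x => x) false with hst
  have hperm : st.Perm times := PySem.List.sorted_perm ..
  have hsne : st ≠ [] := by
    rw [hst, Ne, PySem.List.sorted_eq_nil_iff]
    exact hne
  have hsp : st.Pairwise (· ≤ ·) := PySem.List.sorted_pairwise ..
  have hgt : ∀ x ∈ st, (-1 : Int) < x := by
    intro x hx
    have := hpos x (hperm.mem_iff.mp hx)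
    omega
  rw [buildRuns_eq st.length st (-1) le_rfl hsp hgt]
  have hlastmem : st.getLastD (-1) ∈ st := by
    rw [List.getLastD_eq_getLast?, List.getLast?_eq_some_getLast hsne, Option.getD_some]
    exact List.getLast_mem hsne
  have hmax : st.getLastD (-1) = (PySem.List.max? times (fun x => x)).getD 0 := by
    obtain ⟨a, ha⟩ := max?_exists times hne
    rw [ha, Option.getD_some]
    have h1 : st.getLastD (-1) ≤ a := PySem.List.max?_isMax ha _ (hperm.mem_iff.mp hlastmem)
    have h2 : a ≤ st.getLastD (-1) :=
      getLast_isMax st hsp (-1) hsne a (hperm.mem_iff.mpr (PySem.List.max?_mem ha))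
    omega
  rw [hmax]
  norm_num
  intro a _ _
  exact (hperm.count_eq (a := a)).symm
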